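-- pv_equiv track=rewrite | github.com/cuc496/Analysis-of-Active-measurement | pathHandler.py | getTm
-- ===== SOURCE A (Python) =====
-- def getPm(paths, lm):
--     pm = []
--     for path in paths:
--         isPm = False
--         for e in path:
--             if e in lm:
--                 isPm = True
--                 break
--         if isPm:
--             pm.append(path)
--     return pm
--
-- def getPn(paths, lm):
--     Pn = []
--     Pm = getPm(paths, lm)
--     for path in paths:
--         if path not in Pm:
--             Pn.append(path)
--     return Pn
--
-- def getWeight(datapaths, edges):
--     weights={}
--     for path in datapaths:
--         for e in path:
--             weights[e] = weights.get(e, 0) + 1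
--     for e in edges:
--         if e not in weights:
--             weights[e] = 0
--     return weights
--
-- def isEdgeinPm(edge, Pm):
--     for path in Pm:
--         if edge in path:
--             return True
--     return False
--
-- def isEdgeinPn(edge, Pn):
--     for path in Pn:
--         if edge in path:
--             return True
--     return False
--
-- def getEdgeWithoutConst(edges, lm, Pm, Pn):
--     noConstEdges = []
--     for e in edges:
--         if isEdgeinPm(e, Pm) and (e not in lm) and (not isEdgeinPn(e, Pn)) and (e not in noConstEdges):
--             noConstEdges.append(e)
--     return noConstEdges
--
-- def getEdgesFromP(paths):
--     edges = []
--     for path in paths: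
--         for e in path:
--             if e not in edges:
--                 edges.append(e)
--     return edges
--
-- def getTm(lm, paths):
--     edges = getEdgesFromP(paths)
--     Tm = 0
--     if not lm:
--         return Tm
--     Pm = getPm(paths, lm)
--     Pn = getPn(paths, lm)
--     noConstEdges = getEdgeWithoutConst(edges, lm, Pm, Pn)
--     traversalofPm = getWeight(Pm, edges)
--     for e in noConstEdges:
--         Tm += traversalofPm[e]
--     return Tm
-- ===== SOURCE B (Python) =====
-- def getTm(lm, paths):
--     lmset = set(lm)
--     counts = {}
--     pn_edges = set()
--     for path in paths:
--         if lmset.isdisjoint(path):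
--             pn_edges.update(path)
--         else:
--             for e in path:
--                 counts[e] = counts.get(e, 0) + 1
--     return sum(c for e, c in counts.items()
--                if e not in lmset and e not in pn_edges)
-- ===== Notes on version B (the rewrite author's own statement) =====
-- stated objective: faster
-- what changed: Replaces the quadratic pipeline (distinct-edge list with linear membership scans, Pm/Pn path lists rescanned per edge) by one pass over paths that classifies each path via a set of lm, accumulates a dict of Pm edge counts and a set of Pn edges, then sums the filtered counts.
import Mathlib
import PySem

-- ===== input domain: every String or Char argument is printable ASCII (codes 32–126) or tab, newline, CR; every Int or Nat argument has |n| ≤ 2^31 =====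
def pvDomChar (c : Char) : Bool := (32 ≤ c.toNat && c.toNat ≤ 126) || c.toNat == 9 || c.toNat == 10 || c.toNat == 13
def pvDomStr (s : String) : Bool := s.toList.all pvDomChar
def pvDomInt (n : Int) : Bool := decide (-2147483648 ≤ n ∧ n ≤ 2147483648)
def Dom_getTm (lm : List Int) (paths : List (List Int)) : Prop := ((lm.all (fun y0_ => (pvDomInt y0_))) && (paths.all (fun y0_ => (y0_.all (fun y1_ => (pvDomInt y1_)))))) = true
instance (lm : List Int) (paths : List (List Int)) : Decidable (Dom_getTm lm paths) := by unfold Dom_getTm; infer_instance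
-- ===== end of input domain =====

-- B replaces A's quadratic Pm/Pn/edge-list rescans by one pass building a count dict and an edge set (faster: asymptotic).


-- ===== PORT A =====
def getPmA (paths : List (List Int)) (lm : List Int) : List (List Int) :=
  paths.foldl (fun pm path =>
    -- inner 'for e in path: if e in lm: isPm = True; break' computes whether some edge is in lm
    let isPm := path.any (fun e => lm.contains e)
    if isPm then pm ++ [path] else pm) []

def getPnA (paths : List (List Int)) (lm : List Int) : List (List Int) :=
  let Pm := getPmA paths lm
  paths.foldl (fun Pn path => if !Pm.contains path then Pn ++ [path] else Pn) []

def getWeightA (datapaths : List (List Int)) (edges : List Int) : PySem.Dict Int Int :=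
  let weights := datapaths.foldl (fun w path =>
      path.foldl (fun w e => w.insert e (w.getD e 0 + 1)) w) PySem.Dict.empty
  edges.foldl (fun w e => if w.contains e then w else w.insert e 0) weights

def isEdgeinPmA (edge : Int) (Pm : List (List Int)) : Bool :=
  -- 'for path in Pm: if edge in path: return True' / 'return False'
  Pm.any (fun path => path.contains edge)

def isEdgeinPnA (edge : Int) (Pn : List (List Int)) : Bool :=
  Pn.any (fun path => path.contains edge)

def getEdgeWithoutConstA (edges : List Int) (lm : List Int)
    (Pm Pn : List (List Int)) : List Int :=
  edges.foldl (fun noConstEdges e =>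
    if isEdgeinPmA e Pm && !lm.contains e && !isEdgeinPnA e Pn && !noConstEdges.contains e
    then noConstEdges ++ [e] else noConstEdges) []

def getEdgesFromPA (paths : List (List Int)) : List Int :=
  paths.foldl (fun edges path =>
    path.foldl (fun edges e => if edges.contains e then edges else edges ++ [e]) edges) []

def getTm (lm : List Int) (paths : List (List Int)) : Int :=
  let edges := getEdgesFromPA paths
  let Tm : Int := 0
  if lm.isEmpty then Tm
  else
    let Pm := getPmA paths lm
    let Pn := getPnA paths lm
    let noConstEdges := getEdgeWithoutConstA edges lm Pm Pn
    let traversalofPm := getWeightA Pm edges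
    -- 'Tm += traversalofPm[e]': the key is always present (each e is in edges and
    -- getWeightA inserts every edge), so getD 0 is exact here
    noConstEdges.foldl (fun Tm e => Tm + traversalofPm.getD e 0) Tm

-- ===== PORT B =====
def getTm_alt (lm : List Int) (paths : List (List Int)) : Int :=
  let lmset := PySem.Set.ofList lm
  let st := paths.foldl
    (fun (st : PySem.Dict Int Int × PySem.Set Int) path =>
      if PySem.Set.isdisjoint lmset path then (st.1, PySem.Set.update st.2 path)
      else (path.foldl (fun counts e => counts.insert e (counts.getD e 0 + 1)) st.1, st.2))
    (PySem.Dict.empty, PySem.Set.empty)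
  -- sum over the dict's items (insertion order; the sum is order-independent)
  ((st.1.items.filter (fun p =>
      !(PySem.Set.contains lmset p.1) && !(PySem.Set.contains st.2 p.1))).map (fun p => p.2)).sum

-- ===== PRECONDITION & SPEC =====
def Spec_getTm (lm : List Int) (paths : List (List Int)) (out : Int) : Prop := out = getTm_alt lm paths
instance (lm : List Int) (paths : List (List Int)) (out : Int) : Decidable (Spec_getTm lm paths out) := by unfold Spec_getTm; infer_instance

-- ===== CLAIM (what is proved, stated in full; the proofs are below) =====
def Claim_equal_getTm : Prop := ∀ (lm : List Int) (paths : List (List Int)), Dom_getTm lm paths → Spec_getTm lm paths (getTm lm paths)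

-- ===== LEMMAS AND PROOFS =====
def hitB (lm : List Int) (p : List Int) : Bool := p.any (fun e => lm.contains e)

lemma getPmA_eq (paths : List (List Int)) (lm : List Int) :
    getPmA paths lm = paths.filter (hitB lm) := by
  simpa [getPmA, hitB] using PySem.List.foldl_append_if_eq_filter (hitB lm) paths []

lemma getPnA_eq (paths : List (List Int)) (lm : List Int) :
    getPnA paths lm = paths.filter (fun p => !hitB lm p) := by
  unfold getPnA
  rw [PySem.List.foldl_append_if_eq_filter (fun p => !(getPmA paths lm).contains p) paths []]
  simp only [List.nil_append]
  apply List.filter_congr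
  intro p hp
  rw [getPmA_eq]
  congr 1
  rw [Bool.eq_iff_iff]
  simp [List.contains_iff_mem, List.mem_filter, hp]

lemma getEdgesFromPA_eq (paths : List (List Int)) :
    getEdgesFromPA paths = PySem.Set.ofList paths.flatten := by
  rw [PySem.Set.ofList_eq_foldl, List.foldl_flatten]
  rfl

lemma noconst_fold (q : Int → Bool) :
    ∀ (l acc : List Int), l.Nodup → (∀ x ∈ l, x ∉ acc) →
      l.foldl (fun acc e => if q e && !acc.contains e then acc ++ [e] else acc) acc
        = acc ++ l.filter q := by
  intro l
  induction l with
  | nil => simp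
  | cons e t ih =>
    intro acc hnd hdis
    have hnem : e ∉ acc := hdis e (by simp)
    simp only [List.foldl_cons]
    rcases hq : q e with _ | _
    · rw [if_neg (by simp [hq]), ih acc hnd.of_cons (fun x hx => hdis x (by simp [hx]))]
      simp [List.filter_cons, hq]
    · rw [if_pos (by simp [List.contains_iff_mem, hnem]), ih (acc ++ [e]) hnd.of_cons ?_]
      · simp [List.filter_cons, hq]
      · intro x hx
        simp only [List.mem_append, List.mem_singleton]
        rintro (h | rfl)
        · exact hdis x (by simp [hx]) h
        · exact (List.nodup_cons.mp hnd).1 hx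

lemma fill_getD (k : Int) :
    ∀ (edges : List Int) (d : PySem.Dict Int Int), d.contains k = true →
      (edges.foldl (fun w e => if w.contains e then w else w.insert e 0) d).getD k 0
        = d.getD k 0 := by
  intro edges
  induction edges with
  | nil => intro d _; rfl
  | cons e t ih =>
    intro d hk
    simp only [List.foldl_cons]
    rcases hc : d.contains e with _ | _
    · rw [if_neg (by simp [hc])]
      have hne : k ≠ e := fun h => by rw [h, hc] at hk; cases hk
      rw [ih (d.insert e 0) (by rw [PySem.Dict.contains_insert]; simp [hk]),
        PySem.Dict.getD_insert, if_neg hne]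
    · rw [if_pos rfl]
      exact ih d hk

lemma disj_eq (lm p : List Int) :
    PySem.Set.isdisjoint (PySem.Set.ofList lm) p = !hitB lm p := by
  rw [Bool.eq_iff_iff, PySem.Set.isdisjoint_iff]
  simp only [Bool.not_eq_true', hitB, List.any_eq_false, List.contains_iff_mem,
    PySem.Set.mem_ofList]
  constructor
  · intro h e hep helm
    exact h e helm hep
  · intro h x hlm hxp
    exact h x hxp hlm

lemma bloop (lm : List Int) :
    ∀ (paths : List (List Int)) (d : PySem.Dict Int Int) (s : PySem.Set Int),
      paths.foldl
        (fun (st : PySem.Dict Int Int × PySem.Set Int) path =>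
          if PySem.Set.isdisjoint (PySem.Set.ofList lm) path then (st.1, PySem.Set.update st.2 path)
          else (path.foldl (fun counts e => counts.insert e (counts.getD e 0 + 1)) st.1, st.2))
        (d, s)
      = ((paths.filter (hitB lm)).flatten.foldl (fun counts e => counts.insert e (counts.getD e 0 + 1)) d,
         PySem.Set.update s (paths.filter (fun p => !hitB lm p)).flatten) := by
  intro paths
  induction paths with
  | nil => intro d s; rfl
  | cons p t ih =>
    intro d s
    simp only [List.foldl_cons]
    rcases h : hitB lm p with _ | _
    · rw [disj_eq, h]
      simp only [Bool.not_false, if_true]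
      rw [ih d (PySem.Set.update s p)]
      simp [List.filter_cons, h, List.flatten_cons, PySem.Set.update, List.foldl_append]
    · rw [disj_eq, h]
      simp only [Bool.not_true, Bool.false_eq_true, if_false]
      rw [ih _ s]
      simp [List.filter_cons, h, List.flatten_cons, List.foldl_append]

-- abbreviations used only in the proofs
def flatPmL (lm : List Int) (paths : List (List Int)) : List Int :=
  (paths.filter (hitB lm)).flatten
def flatPnL (lm : List Int) (paths : List (List Int)) : List Int :=
  (paths.filter (fun p => !hitB lm p)).flatten

lemma getTm_alt_eq (lm : List Int) (paths : List (List Int)) :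
    getTm_alt lm paths =
      (((PySem.Set.ofList (flatPmL lm paths)).filter
          (fun k => !(PySem.Set.contains (PySem.Set.ofList lm) k) &&
                    !(PySem.Set.contains (PySem.Set.ofList (flatPnL lm paths)) k))).map
        (fun k => (List.count k (flatPmL lm paths) : Int))).sum := by
  simp only [getTm_alt]
  rw [bloop lm paths PySem.Dict.empty PySem.Set.empty]
  simp only [PySem.Dict.foldl_insert_getD_add_one_eq_counter]
  rw [show PySem.Set.update PySem.Set.empty ((paths.filter (fun p => !hitB lm p)).flatten)
      = PySem.Set.ofList ((paths.filter (fun p => !hitB lm p)).flatten) from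
      PySem.Set.update_nil_left _]
  rw [PySem.Dict.items_counter, List.filter_map, List.map_map]
  rfl

lemma mem_flatPmL (lm : List Int) (paths : List (List Int)) (x : Int) :
    x ∈ flatPmL lm paths ↔ ∃ p ∈ paths, hitB lm p = true ∧ x ∈ p := by
  simp only [flatPmL, List.mem_flatten, List.mem_filter]
  constructor
  · rintro ⟨l, ⟨hl, hh⟩, hx⟩; exact ⟨l, hl, hh, hx⟩
  · rintro ⟨l, hl, hh, hx⟩; exact ⟨l, ⟨hl, hh⟩, hx⟩

lemma mem_flatPnL (lm : List Int) (paths : List (List Int)) (x : Int) :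
    x ∈ flatPnL lm paths ↔ ∃ p ∈ paths, hitB lm p = false ∧ x ∈ p := by
  simp only [flatPnL, List.mem_flatten, List.mem_filter]
  constructor
  · rintro ⟨l, ⟨hl, hh⟩, hx⟩; exact ⟨l, hl, by simpa using hh, hx⟩
  · rintro ⟨l, hl, hh, hx⟩; exact ⟨l, ⟨hl, by simpa using hh⟩, hx⟩

lemma isEdgeinPmA_iff (lm : List Int) (paths : List (List Int)) (x : Int) :
    isEdgeinPmA x (paths.filter (hitB lm)) = true ↔ x ∈ flatPmL lm paths := by
  simp only [isEdgeinPmA, List.any_eq_true, List.contains_iff_mem, List.mem_filter,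
    mem_flatPmL]
  constructor
  · rintro ⟨p, ⟨hp, hh⟩, hx⟩; exact ⟨p, hp, hh, hx⟩
  · rintro ⟨p, hp, hh, hx⟩; exact ⟨p, ⟨hp, hh⟩, hx⟩

lemma isEdgeinPnA_iff (lm : List Int) (paths : List (List Int)) (x : Int) :
    isEdgeinPnA x (paths.filter (fun p => !hitB lm p)) = true ↔ x ∈ flatPnL lm paths := by
  simp only [isEdgeinPnA, List.any_eq_true, List.contains_iff_mem, List.mem_filter,
    mem_flatPnL]
  constructor
  · rintro ⟨p, ⟨hp, hh⟩, hx⟩; exact ⟨p, hp, by simpa using hh, hx⟩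
  · rintro ⟨p, hp, hh, hx⟩; exact ⟨p, ⟨hp, by simpa using hh⟩, hx⟩

-- ===== VERDICT (by name: the statement is the Claim_ definition above) =====
theorem getTm_spec : Claim_equal_getTm := by
  intro lm paths _
  unfold Spec_getTm
  rw [getTm_alt_eq]
  simp only [getTm]
  cases hlm : lm.isEmpty
  · -- lm nonempty: the main computation
    simp only [Bool.false_eq_true, if_false]
    rw [getEdgesFromPA_eq, getPmA_eq, getPnA_eq]
    -- the noConstEdges loop is a filter over the nodup edge list
    unfold getEdgeWithoutConstA
    rw [noconst_fold
        (fun e => isEdgeinPmA e (paths.filter (hitB lm)) && !lm.contains e &&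
                  !isEdgeinPnA e (paths.filter (fun p => !hitB lm p)))
        (PySem.Set.ofList paths.flatten) [] (PySem.Set.nodup_ofList _) (by simp)]
    simp only [List.nil_append]
    rw [PySem.List.foldl_add]
    rw [zero_add]
    -- the weight lookup is the Pm-traversal count on every summed edge
    have hmapeq :
        (List.filter
            (fun e => isEdgeinPmA e (paths.filter (hitB lm)) && !lm.contains e &&
                      !isEdgeinPnA e (paths.filter (fun p => !hitB lm p)))
            (PySem.Set.ofList paths.flatten)).map
          (fun e => (getWeightA (paths.filter (hitB lm)) (PySem.Set.ofList paths.flatten)).getD e 0)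
        = (List.filter
            (fun e => isEdgeinPmA e (paths.filter (hitB lm)) && !lm.contains e &&
                      !isEdgeinPnA e (paths.filter (fun p => !hitB lm p)))
            (PySem.Set.ofList paths.flatten)).map
          (fun k => (List.count k (flatPmL lm paths) : Int)) := by
      apply List.map_congr_left
      intro e he
      have hq := (List.mem_filter.mp he).2
      have hpm : e ∈ flatPmL lm paths := by
        rw [← isEdgeinPmA_iff lm paths e]
        have := (Bool.and_eq_true _ _).mp ((Bool.and_eq_true _ _).mp hq).1
        exact this.1
      unfold getWeightA
      rw [← List.foldl_flatten, PySem.Dict.foldl_insert_getD_add_one_eq_counter]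
      rw [fill_getD e _ _ (by
        rw [PySem.Dict.contains_counter]
        exact List.contains_iff_mem.mpr hpm)]
      exact PySem.Dict.getD_counter _ _
    rw [hmapeq]
    -- the two nodup index lists are permutations, so the sums agree
    apply List.Perm.sum_eq
    apply List.Perm.map
    apply List.perm_of_nodup_nodup_toFinset_eq
    · exact (PySem.Set.nodup_ofList _).filter _
    · exact (PySem.Set.nodup_ofList _).filter _
    · ext x
      simp only [List.mem_toFinset, List.mem_filter, PySem.Set.mem_ofList,
        Bool.and_eq_true, Bool.not_eq_eq_eq_not, Bool.not_true,
        isEdgeinPmA_iff, isEdgeinPnA_iff]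
      have hc : ∀ (ys : List Int) (y : Int),
          (PySem.Set.ofList ys).contains y = false ↔ y ∉ ys := by
        intro ys y
        rw [← Bool.not_eq_true, PySem.Set.contains_iff, PySem.Set.mem_ofList]
      constructor
      · rintro ⟨hall, ⟨hpm, hlmc⟩, hpn⟩
        refine ⟨hpm, (hc _ _).mpr ?_, (hc _ _).mpr ?_⟩
        · simpa [List.contains_iff_mem] using hlmc
        · rw [← isEdgeinPnA_iff lm paths x]
          simp [hpn]
      · rintro ⟨hpm, hlmc, hpn⟩
        refine ⟨?_, ⟨hpm, ?_⟩, ?_⟩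
        · obtain ⟨p, hp, _, hx⟩ := (mem_flatPmL lm paths x).mp hpm
          exact List.mem_flatten.mpr ⟨p, hp, hx⟩
        · rcases h2 : lm.contains x with _ | _
          · rfl
          · exact absurd (List.contains_iff_mem.mp h2) ((hc lm x).mp hlmc)
        · rcases h2 : isEdgeinPnA x (List.filter (fun p => !hitB lm p) paths) with _ | _
          · rfl
          · exact absurd ((isEdgeinPnA_iff lm paths x).mp h2) ((hc _ _).mp hpn)
  · -- lm = []: A returns 0 and B's dict is empty
    simp only [if_true]
    have hlm' : lm = [] := List.isEmpty_iff.mp hlm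
    subst hlm'
    have hnil : paths.filter (hitB []) = [] :=
      List.filter_eq_nil_iff.mpr (by intro p hp; simp [hitB])
    simp [flatPmL, hnil]
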